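-- pv_equiv track=rewrite | github.com/matt-gree/RioStatFileEventLookup | event_search_class.py | listInputHandling
-- ===== SOURCE A (Python) =====
-- def listInputHandling(inputList, class_variable, to_zero=False):
--     # Used with class variables that have integer keys
--     result = set()
--     for i in inputList:
--         if abs(i) not in class_variable.keys():
--             continue
--         if i >= 0:
--             result = result.union(class_variable[i])
--         else:
--             if to_zero:
--                 for j in range(0, abs(i)):
--                     result = result.union(class_variable[j])
--             else:
--                 for j in range(abs(i), max(class_variable.keys())+1):
--                     result = result.union(class_variable[j])
--
--     return result
-- ===== SOURCE B (Python) =====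
-- def listInputHandling(inputList, class_variable, to_zero=False):
--     # Flat-table rewrite: concatenate the elements of keys 0..top once into 'flat'
--     # (offsets[k] = where key k's elements start), then each item contributes one
--     # slice of 'flat' (prefix slice for to_zero, suffix slice otherwise) or one
--     # direct value, accumulated by in-place set.update — no inner key loop and no
--     # repeated max(keys) computation per item.
--     top = max(class_variable, default=-1)
--     flat = []
--     offsets = []
--     for k in range(top + 1):
--         offsets.append(len(flat))
--         flat.extend(class_variable.get(k, ()))
--     offsets.append(len(flat))
--     result = set()
--     for i in inputList:
--         if abs(i) not in class_variable:
--             continue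
--         if i >= 0:
--             result.update(class_variable[i])
--         elif to_zero:
--             result.update(flat[:offsets[-i]])
--         else:
--             result.update(flat[offsets[-i]:])
--     return result
-- ===== Notes on version B (the rewrite author's own statement) =====
-- stated objective: alternative
-- what changed: B is table-driven: it builds once a flat array of the elements of keys 0..top with an offsets table marking where each key's elements start, then answers every item with a single slice of that array (prefix slice for to_zero, suffix slice otherwise) accumulated by in-place set.update, instead of A's per-item inner loop over a key range with repeated set unions and a max(keys) recomputation per negative item.
import Mathlib
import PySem

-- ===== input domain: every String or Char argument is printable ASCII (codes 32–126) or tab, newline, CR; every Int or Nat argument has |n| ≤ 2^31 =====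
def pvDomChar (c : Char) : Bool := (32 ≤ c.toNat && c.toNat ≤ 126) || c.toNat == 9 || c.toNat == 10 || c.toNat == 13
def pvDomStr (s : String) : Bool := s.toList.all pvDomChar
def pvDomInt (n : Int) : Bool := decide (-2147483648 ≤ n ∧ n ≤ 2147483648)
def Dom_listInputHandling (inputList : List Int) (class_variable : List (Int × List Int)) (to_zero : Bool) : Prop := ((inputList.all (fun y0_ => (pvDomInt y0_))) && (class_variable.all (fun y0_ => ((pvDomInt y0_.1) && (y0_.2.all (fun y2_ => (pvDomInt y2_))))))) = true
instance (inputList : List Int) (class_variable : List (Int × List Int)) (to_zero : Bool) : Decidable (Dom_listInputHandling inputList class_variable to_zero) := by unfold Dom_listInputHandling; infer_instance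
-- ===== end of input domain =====

-- B replaces A's per-item inner range loops (and per-item max(keys) scans) with one flat
-- element array over the key line built once plus an offsets table: each item contributes a
-- single slice of that array, accumulated by in-place set update; objective: alternative.

-- ===== PORT A =====
def listInputHandling (inputList : List Int) (class_variable : List (Int × List Int)) (to_zero : Bool) : List Int :=
  let d := PySem.Dict.ofList class_variable
  inputList.foldl (fun result i =>
    if PySem.Dict.contains d |i| then
      if i ≥ 0 then
        PySem.Set.union result (PySem.Dict.getD d i [])
      else if to_zero then
        (PySem.List.pyRange 0 |i| 1).foldl
          (fun r j => PySem.Set.union r (PySem.Dict.getD d j [])) result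
      else
        (PySem.List.pyRange |i|
            (((PySem.List.max? (PySem.Dict.keys d) (fun x => x)).getD 0) + 1) 1).foldl
          (fun r j => PySem.Set.union r (PySem.Dict.getD d j [])) result
    else result) PySem.Set.empty

-- ===== PORT B =====
def listInputHandling_alt (inputList : List Int) (class_variable : List (Int × List Int)) (to_zero : Bool) : List Int :=
  let d := PySem.Dict.ofList class_variable
  -- top = max(class_variable, default=-1)
  let top := (PySem.List.max? (PySem.Dict.keys d) (fun x => x)).getD (-1)
  -- for k in range(top + 1): offsets.append(len(flat)); flat.extend(class_variable.get(k, ()))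
  let st := (PySem.List.pyRange 0 (top + 1) 1).foldl
      (fun (st : List Int × List Int) k =>
        (st.1 ++ [PySem.List.len st.2], st.2 ++ PySem.Dict.getD d k [])) ([], [])
  -- offsets.append(len(flat))
  let offsets := st.1 ++ [PySem.List.len st.2]
  let flat := st.2
  inputList.foldl (fun result i =>
    if PySem.Dict.contains d |i| then
      if i ≥ 0 then PySem.Set.update result (PySem.Dict.getD d i [])
      else if to_zero then
        PySem.Set.update result (PySem.List.slice flat none (some (PySem.List.pyGetD offsets (-i) 0)))
      else
        PySem.Set.update result (PySem.List.slice flat (some (PySem.List.pyGetD offsets (-i) 0)) none)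
    else result) PySem.Set.empty

-- ===== PRECONDITION & SPEC =====
-- Pre_ excludes exactly the inputs where Python A raises KeyError: a negative item whose
-- absolute value is a key but whose selected key range contains a non-key index.
def Pre_listInputHandling (inputList : List Int) (class_variable : List (Int × List Int)) (to_zero : Bool) : Prop :=
  ∀ i ∈ inputList, i < 0 →
    PySem.Dict.contains (PySem.Dict.ofList class_variable) |i| = true →
    ∀ j ∈ (if to_zero then PySem.List.pyRange 0 |i| 1
           else PySem.List.pyRange |i|
             (((PySem.List.max? (PySem.Dict.keys (PySem.Dict.ofList class_variable)) (fun x => x)).getD 0) + 1) 1),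
      PySem.Dict.contains (PySem.Dict.ofList class_variable) j = true
instance (inputList : List Int) (class_variable : List (Int × List Int)) (to_zero : Bool) : Decidable (Pre_listInputHandling inputList class_variable to_zero) := by unfold Pre_listInputHandling; infer_instance

def pvWitness_listInputHandling : List Int × (List (Int × List Int)) × Bool :=
  ([1, -2], [(0, [10]), (1, [11]), (2, [12])], false)

def Spec_listInputHandling (inputList : List Int) (class_variable : List (Int × List Int)) (to_zero : Bool) (out : List Int) : Prop := out = listInputHandling_alt inputList class_variable to_zero
instance (inputList : List Int) (class_variable : List (Int × List Int)) (to_zero : Bool) (out : List Int) : Decidable (Spec_listInputHandling inputList class_variable to_zero out) := by unfold Spec_listInputHandling; infer_instance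

-- ===== CLAIM (what is proved, stated in full; the proofs are below) =====
def Claim_equal_listInputHandling : Prop := ∀ (inputList : List Int) (class_variable : List (Int × List Int)) (to_zero : Bool), Dom_listInputHandling inputList class_variable to_zero → Pre_listInputHandling inputList class_variable to_zero → Spec_listInputHandling inputList class_variable to_zero (listInputHandling inputList class_variable to_zero)

-- ===== LEMMAS AND PROOFS =====

-- per-item selected elements (common value both loops accumulate; top is a parameter
-- because A reads max(keys) with default 0 and B with default -1 — equal when a guard fires)
def pvChunk (d : PySem.Dict Int (List Int)) (to_zero : Bool) (top : Int) (i : Int) : List Int :=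
  if PySem.Dict.contains d |i| then
    if i ≥ 0 then PySem.Dict.getD d i []
    else if to_zero then (PySem.List.pyRange 0 (-i) 1).flatMap (fun j => PySem.Dict.getD d j [])
    else (PySem.List.pyRange (-i) (top + 1) 1).flatMap (fun j => PySem.Dict.getD d j [])
  else []

theorem pv_foldl_update (h : Int → List Int) (l : List Int) (r : List Int) :
    l.foldl (fun r i => PySem.Set.update r (h i)) r = PySem.Set.update r (l.flatMap h) := by
  induction l generalizing r with
  | nil => rfl
  | cons a t ih =>
    simp only [List.foldl_cons, List.flatMap_cons]
    rw [ih]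
    simp [PySem.Set.update, List.foldl_append]

theorem pv_len_pyRange_zero (k : Nat) : (PySem.List.pyRange 0 (k : Int) 1).length = k := by
  rw [PySem.List.pyRange_zero]; simp

theorem pv_take_pyRange (b : Int) (k : Nat) (hk : (k : Int) ≤ b) :
    (PySem.List.pyRange 0 b 1).take k = PySem.List.pyRange 0 (k : Int) 1 := by
  rw [PySem.List.pyRange_zero, PySem.List.pyRange_zero, ← List.map_take, List.take_range]
  congr 2
  omega

theorem pv_drop_pyRange (b : Int) (k : Nat) (hk : (k : Int) ≤ b) :
    (PySem.List.pyRange 0 b 1).drop k = PySem.List.pyRange (k : Int) b 1 := by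
  have hsplit := PySem.List.pyRange_one_append 0 (k : Int) b (by positivity) hk
  rw [hsplit, List.drop_left' (pv_len_pyRange_zero k)]

theorem pv_mem_keys {d : PySem.Dict Int (List Int)} {k : Int}
    (h : PySem.Dict.contains d k = true) : k ∈ PySem.Dict.keys d := by
  simp only [PySem.Dict.contains, List.any_eq_true] at h
  obtain ⟨p, hp, hk⟩ := h
  simp only [PySem.Dict.keys, List.mem_map]
  exact ⟨p, hp, by simpa using hk⟩

theorem pv_max_some {d : PySem.Dict Int (List Int)} {k : Int}
    (h : PySem.Dict.contains d k = true) :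
    ∃ m, PySem.List.max? (PySem.Dict.keys d) (fun x => x) = some m ∧ k ≤ m := by
  cases hm : PySem.List.max? (PySem.Dict.keys d) (fun x => x) with
  | none =>
    rw [PySem.List.max?_eq_none_iff] at hm
    have := pv_mem_keys h
    simp [hm] at this
  | some m => exact ⟨m, rfl, PySem.List.max?_id_le hm _ (pv_mem_keys h)⟩

-- B's build loop: offsets-so-far and the flat element array, over any key list
theorem pv_build (g : Int → List Int) (l : List Int) :
    l.foldl (fun (st : List Int × List Int) k => (st.1 ++ [PySem.List.len st.2], st.2 ++ g k)) ([], [])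
    = ((List.range l.length).map (fun k => PySem.List.len ((l.take k).flatMap g)), l.flatMap g) := by
  induction l using List.reverseRecOn with
  | nil => rfl
  | append_singleton l a ih =>
    rw [List.foldl_append, ih]
    simp only [List.foldl_cons, List.foldl_nil, List.length_append, List.length_singleton,
      List.flatMap_append, Prod.mk.injEq]
    refine ⟨?_, by simp⟩
    rw [List.range_succ, List.map_append]
    congr 1
    · apply List.map_congr_left
      intro k hk
      rw [List.take_append_of_le_length (Nat.lt_succ_iff.mp (Nat.lt_succ_of_lt (List.mem_range.mp hk)))]
    · rw [List.map_singleton, List.take_append_of_le_length (le_refl _), List.take_length]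

theorem pv_offsets_get (g : Int → List Int) (l : List Int) (k : Nat) (hk : k ≤ l.length) :
    PySem.List.pyGetD ((List.range l.length).map (fun j => PySem.List.len ((l.take j).flatMap g))
        ++ [PySem.List.len (l.flatMap g)]) ((k : Nat) : Int) 0
    = PySem.List.len ((l.take k).flatMap g) := by
  have h : (List.range l.length).map (fun j => PySem.List.len ((l.take j).flatMap g))
        ++ [PySem.List.len (l.flatMap g)]
      = (List.range (l.length + 1)).map (fun j => PySem.List.len ((l.take j).flatMap g)) := by
    rw [List.range_succ, List.map_append, List.map_singleton, List.take_length]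
  rw [h, PySem.List.pyGetD_natCast,
    List.getD_eq_getElem _ _ (by rw [List.length_map, List.length_range]; omega),
    List.getElem_map, List.getElem_range]

theorem pv_slice_take (g : Int → List Int) (l : List Int) (k : Nat) :
    PySem.List.slice (l.flatMap g) none (some (PySem.List.len ((l.take k).flatMap g)))
    = (l.take k).flatMap g := by
  have h : l.flatMap g = (l.take k).flatMap g ++ (l.drop k).flatMap g := by
    rw [← List.flatMap_append, List.take_append_drop]
  rw [PySem.List.len_eq, PySem.List.slice_to _ (by positivity), Int.toNat_natCast, h, List.take_left]

theorem pv_slice_drop (g : Int → List Int) (l : List Int) (k : Nat) :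
    PySem.List.slice (l.flatMap g) (some (PySem.List.len ((l.take k).flatMap g))) none
    = (l.drop k).flatMap g := by
  have h : l.flatMap g = (l.take k).flatMap g ++ (l.drop k).flatMap g := by
    rw [← List.flatMap_append, List.take_append_drop]
  rw [PySem.List.len_eq, PySem.List.slice_from _ (by positivity), Int.toNat_natCast, h, List.drop_left]

theorem pv_A_step (d : PySem.Dict Int (List Int)) (tz : Bool) (r : List Int) (i : Int) :
    (if PySem.Dict.contains d |i| then
       if i ≥ 0 then PySem.Set.union r (PySem.Dict.getD d i [])
       else if tz then
         (PySem.List.pyRange 0 |i| 1).foldl (fun r j => PySem.Set.union r (PySem.Dict.getD d j [])) r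
       else
         (PySem.List.pyRange |i| (((PySem.List.max? (PySem.Dict.keys d) (fun x => x)).getD 0) + 1) 1).foldl
           (fun r j => PySem.Set.union r (PySem.Dict.getD d j [])) r
     else r)
    = PySem.Set.update r (pvChunk d tz ((PySem.List.max? (PySem.Dict.keys d) (fun x => x)).getD 0) i) := by
  unfold pvChunk
  split_ifs with h1 h2 h3
  · rfl
  · rw [abs_of_neg (by omega)]
    exact pv_foldl_update _ _ _
  · rw [abs_of_neg (by omega)]
    exact pv_foldl_update _ _ _
  · rfl

theorem pv_B_step (d : PySem.Dict Int (List Int)) (tz : Bool) (r : List Int) (i : Int) :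
    (if PySem.Dict.contains d |i| then
       if i ≥ 0 then PySem.Set.update r (PySem.Dict.getD d i [])
       else if tz then
         PySem.Set.update r (PySem.List.slice ((PySem.List.pyRange 0 (((PySem.List.max? (PySem.Dict.keys d) (fun x => x)).getD (-1)) + 1) 1).foldl (fun (st : List Int × List Int) k => (st.1 ++ [PySem.List.len st.2], st.2 ++ PySem.Dict.getD d k [])) ([], [])).2 none
           (some (PySem.List.pyGetD (((PySem.List.pyRange 0 (((PySem.List.max? (PySem.Dict.keys d) (fun x => x)).getD (-1)) + 1) 1).foldl (fun (st : List Int × List Int) k => (st.1 ++ [PySem.List.len st.2], st.2 ++ PySem.Dict.getD d k [])) ([], [])).1 ++ [PySem.List.len ((PySem.List.pyRange 0 (((PySem.List.max? (PySem.Dict.keys d) (fun x => x)).getD (-1)) + 1) 1).foldl (fun (st : List Int × List Int) k => (st.1 ++ [PySem.List.len st.2], st.2 ++ PySem.Dict.getD d k [])) ([], [])).2]) (-i) 0)))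
       else
         PySem.Set.update r (PySem.List.slice ((PySem.List.pyRange 0 (((PySem.List.max? (PySem.Dict.keys d) (fun x => x)).getD (-1)) + 1) 1).foldl (fun (st : List Int × List Int) k => (st.1 ++ [PySem.List.len st.2], st.2 ++ PySem.Dict.getD d k [])) ([], [])).2
           (some (PySem.List.pyGetD (((PySem.List.pyRange 0 (((PySem.List.max? (PySem.Dict.keys d) (fun x => x)).getD (-1)) + 1) 1).foldl (fun (st : List Int × List Int) k => (st.1 ++ [PySem.List.len st.2], st.2 ++ PySem.Dict.getD d k [])) ([], [])).1 ++ [PySem.List.len ((PySem.List.pyRange 0 (((PySem.List.max? (PySem.Dict.keys d) (fun x => x)).getD (-1)) + 1) 1).foldl (fun (st : List Int × List Int) k => (st.1 ++ [PySem.List.len st.2], st.2 ++ PySem.Dict.getD d k [])) ([], [])).2]) (-i) 0)) none)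
     else r)
    = PySem.Set.update r (pvChunk d tz ((PySem.List.max? (PySem.Dict.keys d) (fun x => x)).getD 0) i) := by
  unfold pvChunk
  split_ifs with h1 h2 h3
  · rfl
  · obtain ⟨m, hm, hle⟩ := pv_max_some h1
    rw [hm]
    simp only [Option.getD_some]
    have hi : i < 0 := by omega
    rw [abs_of_neg hi] at hle
    have hcast : -i = (((-i).toNat : Nat) : Int) := by omega
    rw [hcast, pv_build,
      pv_offsets_get _ _ _ (by rw [PySem.List.pyRange_zero]; simp only [List.length_map, List.length_range]; omega),
      pv_slice_take, pv_take_pyRange _ _ (by omega)]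
  · obtain ⟨m, hm, hle⟩ := pv_max_some h1
    rw [hm]
    simp only [Option.getD_some]
    have hi : i < 0 := by omega
    rw [abs_of_neg hi] at hle
    have hcast : -i = (((-i).toNat : Nat) : Int) := by omega
    rw [hcast, pv_build,
      pv_offsets_get _ _ _ (by rw [PySem.List.pyRange_zero]; simp only [List.length_map, List.length_range]; omega),
      pv_slice_drop, pv_drop_pyRange _ _ (by omega)]
  · rfl

theorem pv_A_char (inputList : List Int) (class_variable : List (Int × List Int)) (to_zero : Bool) :
    listInputHandling inputList class_variable to_zero
      = PySem.Set.update PySem.Set.empty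
          (inputList.flatMap (pvChunk (PySem.Dict.ofList class_variable) to_zero
            ((PySem.List.max? (PySem.Dict.keys (PySem.Dict.ofList class_variable)) (fun x => x)).getD 0))) := by
  simp only [listInputHandling]
  rw [funext (fun r => funext (fun i => pv_A_step (PySem.Dict.ofList class_variable) to_zero r i))]
  exact pv_foldl_update _ _ _

theorem pv_B_char (inputList : List Int) (class_variable : List (Int × List Int)) (to_zero : Bool) :
    listInputHandling_alt inputList class_variable to_zero
      = PySem.Set.update PySem.Set.empty
          (inputList.flatMap (pvChunk (PySem.Dict.ofList class_variable) to_zero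
            ((PySem.List.max? (PySem.Dict.keys (PySem.Dict.ofList class_variable)) (fun x => x)).getD 0))) := by
  simp only [listInputHandling_alt]
  rw [funext (fun r => funext (fun i => pv_B_step (PySem.Dict.ofList class_variable) to_zero r i))]
  exact pv_foldl_update _ _ _

-- ===== VERDICT (by name: the statement is the Claim_ definition above) =====
theorem listInputHandling_spec : Claim_equal_listInputHandling := by
  intro inputList class_variable to_zero _ _
  show listInputHandling inputList class_variable to_zero
      = listInputHandling_alt inputList class_variable to_zero
  rw [pv_A_char, pv_B_char]
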